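-- pv_equiv track=rewrite | github.com/andreaceto/schedulebot | src/schedulebot/nlu/nlu_processor.py | _fuse_practitioner_entities
-- ===== SOURCE A (Python) =====
-- def _fuse_practitioner_entities(all_entities, text):
--     """
--     Merges practitioner_name and PERSON entities by concatenating their
--     unique values to avoid simple repetition.
--     """
--     # Collect all fragments from both sources
--     practitioner_frags = [
--         e["value"]
--         for e in all_entities
--         if e["entity"] in ["practitioner_name", "PERSON"]
--     ]
--     other_entities = [
--         e
--         for e in all_entities
--         if e["entity"] not in ["practitioner_name", "PERSON"]
--     ]
--
--     if not practitioner_frags: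
--         return other_entities
--
--     # Use dict.fromkeys to get unique fragments while preserving their order of appearance
--     unique_frags = list(dict.fromkeys(practitioner_frags))
--
--     # remove redundant substrings
--     cleaned_frags = []
--     for frag in unique_frags:
--         is_redundant = False
--         # Check if this fragment is a substring of any other, longer fragment
--         for other_frag in unique_frags:
--             if frag != other_frag and frag in other_frag:
--                 is_redundant = True
--                 break
--         if not is_redundant:
--             cleaned_frags.append(frag)
--
--     # Join the cleaned, meaningful parts
--     fused_name = " ".join(cleaned_frags)
--
--     final_entities = other_entities
--     final_entities.append(
--         {
--             "entity": "practitioner_name",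
--             "value": fused_name,
--             "extractor": "multitask_model+spacy",  # Indicate it was a result of fusion
--         }
--     )
--
--     return final_entities
-- ===== SOURCE B (Python) =====
-- def _fuse_practitioner_entities(all_entities, text):
--     """
--     Merges practitioner_name and PERSON entities by concatenating their
--     unique values to avoid simple repetition.
--     """
--     # Single pass: split entities into practitioner fragments and the rest
--     frags = []
--     other_entities = []
--     for e in all_entities:
--         if e["entity"] in ("practitioner_name", "PERSON"):
--             frags.append(e["value"])
--         else:
--             other_entities.append(e)
--
--     if not frags:
--         return other_entities
--
--     unique_frags = list(dict.fromkeys(frags))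
--
--     # Greedy maximal-fragment selection: visit fragments longest-first and
--     # keep one only if it is not contained in an already-kept fragment.
--     kept = []
--     for frag in sorted(unique_frags, key=len, reverse=True):
--         if not any(frag in k for k in kept):
--             kept.append(frag)
--     keep = set(kept)
--
--     # Re-emit survivors in their original order of appearance
--     fused_name = " ".join(f for f in unique_frags if f in keep)
--
--     return other_entities + [
--         {
--             "entity": "practitioner_name",
--             "value": fused_name,
--             "extractor": "multitask_model+spacy",
--         }
--     ]
-- ===== Notes on version B (the rewrite author's own statement) =====
-- stated objective: alternative
-- what changed: Replaces A's all-pairs redundancy test over unique fragments with a single one-pass split of the entities plus a greedy longest-first scan that keeps a fragment only if no already-kept fragment contains it, then re-emits survivors in original order; correctness rests on substring containment implying strictly greater length and being transitive.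
import Mathlib
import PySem

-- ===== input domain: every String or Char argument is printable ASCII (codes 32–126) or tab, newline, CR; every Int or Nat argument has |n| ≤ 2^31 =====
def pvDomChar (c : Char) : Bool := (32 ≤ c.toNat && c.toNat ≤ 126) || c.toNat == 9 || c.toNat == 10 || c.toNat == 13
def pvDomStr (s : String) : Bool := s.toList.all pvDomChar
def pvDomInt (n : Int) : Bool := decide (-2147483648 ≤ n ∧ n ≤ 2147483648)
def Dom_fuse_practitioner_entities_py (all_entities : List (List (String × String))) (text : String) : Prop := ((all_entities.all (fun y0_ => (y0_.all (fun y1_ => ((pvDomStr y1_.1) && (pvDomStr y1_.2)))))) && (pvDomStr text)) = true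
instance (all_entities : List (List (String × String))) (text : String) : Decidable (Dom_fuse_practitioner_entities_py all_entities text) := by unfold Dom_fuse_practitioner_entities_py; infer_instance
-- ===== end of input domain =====

-- B replaces A's all-pairs substring-redundancy test by a one-pass entity split and a greedy
-- longest-first scan keeping only maximal fragments (objective: alternative algorithm, same cost class).

-- ===== PORT A =====
-- shared raising lookups e["entity"] / e["value"]: Pre_ guarantees the keys are present
def pvEnt (e : List (String × String)) : String := PySem.Dict.getD (PySem.Dict.mk e) "entity" ""
def pvVal (e : List (String × String)) : String := PySem.Dict.getD (PySem.Dict.mk e) "value" ""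

def fuse_practitioner_entities_py (all_entities : List (List (String × String))) (text : String) : List (List (String × String)) :=
  let practitioner_frags :=
    (all_entities.filter (fun e => ["practitioner_name", "PERSON"].contains (pvEnt e))).map (fun e => pvVal e)
  let other_entities :=
    all_entities.filter (fun e => !(["practitioner_name", "PERSON"].contains (pvEnt e)))
  if practitioner_frags = [] then other_entities
  else
    let unique_frags := PySem.List.dedup practitioner_frags
    let cleaned_frags := unique_frags.foldl (fun acc frag =>
        if unique_frags.any (fun other_frag => !(frag == other_frag) && PySem.Str.isIn frag other_frag)
        then acc
        else acc ++ [frag]) []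
    let fused_name := PySem.Str.join " " cleaned_frags
    other_entities ++ [[("entity", "practitioner_name"), ("value", fused_name), ("extractor", "multitask_model+spacy")]]

-- ===== PORT B =====
def fuse_practitioner_entities_py_alt (all_entities : List (List (String × String))) (text : String) : List (List (String × String)) :=
  let split := all_entities.foldl
    (fun (acc : List String × List (List (String × String))) e =>
      if pvEnt e == "practitioner_name" || pvEnt e == "PERSON"
      then (acc.1 ++ [pvVal e], acc.2)
      else (acc.1, acc.2 ++ [e])) ([], [])
  let frags := split.1
  let other_entities := split.2
  if frags = [] then other_entities
  else
    let unique_frags := PySem.List.dedup frags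
    let kept := (PySem.List.sorted unique_frags PySem.Str.len true).foldl
        (fun acc frag => if acc.any (fun k => PySem.Str.isIn frag k) then acc else acc ++ [frag]) []
    let keep := PySem.Set.ofList kept
    let fused_name := PySem.Str.join " " (unique_frags.filter (fun f => PySem.Set.contains keep f))
    other_entities ++ [[("entity", "practitioner_name"), ("value", fused_name), ("extractor", "multitask_model+spacy")]]

-- ===== PRECONDITION & SPEC =====
-- Pre_ excludes exactly the inputs where Python A raises KeyError: an entity without the
-- "entity" key, or a practitioner/PERSON entity without the "value" key.
def Pre_fuse_practitioner_entities_py (all_entities : List (List (String × String))) (text : String) : Prop :=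
  ∀ e ∈ all_entities, (PySem.Dict.mk e).contains "entity" = true ∧
    (["practitioner_name", "PERSON"].contains (PySem.Dict.getD (PySem.Dict.mk e) "entity" "") = true →
      (PySem.Dict.mk e).contains "value" = true)
instance (all_entities : List (List (String × String))) (text : String) : Decidable (Pre_fuse_practitioner_entities_py all_entities text) := by unfold Pre_fuse_practitioner_entities_py; infer_instance

def pvWitness_fuse_practitioner_entities_py : (List (List (String × String))) × String :=
  ([[("entity", "practitioner_name"), ("value", "Dr Ana Ruiz")],
    [("entity", "PERSON"), ("value", "Ana Ruiz")],
    [("entity", "time"), ("value", "3pm")]], "see Dr Ana Ruiz at 3pm")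

def Spec_fuse_practitioner_entities_py (all_entities : List (List (String × String))) (text : String) (out : List (List (String × String))) : Prop := out = fuse_practitioner_entities_py_alt all_entities text
instance (all_entities : List (List (String × String))) (text : String) (out : List (List (String × String))) : Decidable (Spec_fuse_practitioner_entities_py all_entities text out) := by unfold Spec_fuse_practitioner_entities_py; infer_instance

-- ===== CLAIM (what is proved, stated in full; the proofs are below) =====
def Claim_equal_fuse_practitioner_entities_py : Prop := ∀ (all_entities : List (List (String × String))) (text : String), Dom_fuse_practitioner_entities_py all_entities text → Pre_fuse_practitioner_entities_py all_entities text → Spec_fuse_practitioner_entities_py all_entities text (fuse_practitioner_entities_py all_entities text)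

-- ===== LEMMAS AND PROOFS =====

-- "f is a maximal fragment of u": contained in no distinct member of u
def pvMaxB (u : List String) (f : String) : Bool :=
  u.all (fun g => f == g || !PySem.Str.isIn f g)

-- containment in a distinct string is strict in length
lemma pvInfixLt (f g : String) (h : f.toList <:+: g.toList) (hne : f ≠ g) :
    f.toList.length < g.toList.length :=
  lt_of_le_of_ne h.length_le (fun he => hne (String.toList_inj.mp (h.eq_of_length he)))

-- any fragment contained in a distinct member of u is contained in a MAXIMAL member of u
lemma pvExistsMax (u : List String) (f : String) :
    ∀ (n : Nat) (g : String), g ∈ u → f.toList <:+: g.toList → f ≠ g →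
      List.foldl max 0 (u.map (fun s => s.toList.length)) ≤ g.toList.length + n →
      ∃ h ∈ u, f ≠ h ∧ f.toList <:+: h.toList ∧ pvMaxB u h = true := by
  intro n
  induction n with
  | zero =>
    intro g hg hinf hne hM
    refine ⟨g, hg, hne, hinf, ?_⟩
    refine List.all_eq_true.mpr (fun x hx => ?_)
    by_cases hgx : g = x
    · simp [hgx]
    · simp only [Bool.or_eq_true, beq_iff_eq]
      right
      simp only [Bool.not_eq_eq_eq_not, Bool.not_true, ← Bool.not_eq_true]
      intro hin
      have hlt : g.toList.length < x.toList.length :=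
        pvInfixLt g x ((PySem.Str.isIn_iff_infix g x).mp hin) hgx
      have hxle : x.toList.length ≤ List.foldl max 0 (u.map (fun s => s.toList.length)) :=
        (PySem.List.le_foldl_max _ 0).2 _ (List.mem_map_of_mem hx)
      omega
  | succ n ih =>
    intro g hg hinf hne hM
    by_cases hmx : pvMaxB u g = true
    · exact ⟨g, hg, hne, hinf, hmx⟩
    · have : ∃ x ∈ u, ¬(g == x || !PySem.Str.isIn g x) = true := by
        rcases List.all_eq_false.mp (Bool.not_eq_true _ |>.mp hmx) with ⟨x, hx, hpx⟩
        exact ⟨x, hx, by simpa using hpx⟩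
      rcases this with ⟨x, hx, hpx⟩
      simp only [Bool.or_eq_true, beq_iff_eq, Bool.not_eq_eq_eq_not, Bool.not_true, not_or,
        ← Bool.not_eq_true, not_not] at hpx
      obtain ⟨hgx, hin⟩ := hpx
      have hgxinf : g.toList <:+: x.toList := (PySem.Str.isIn_iff_infix g x).mp hin
      have hlt : g.toList.length < x.toList.length := pvInfixLt g x hgxinf hgx
      have hfle : f.toList.length ≤ g.toList.length := hinf.length_le
      refine ih x hx (hinf.trans hgxinf) (fun hfx => ?_) (by omega)
      subst hfx; omega

-- the greedy longest-first scan returns exactly the maximal fragments of u, in scan order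
lemma pvScanFilter (u : List String) (hnd : u.Nodup) :
    ∀ (S₂ S₁ : List String), (S₁ ++ S₂).Perm u →
      (S₁ ++ S₂).Pairwise (fun a b => PySem.Str.len b ≤ PySem.Str.len a) →
      S₂.foldl (fun acc frag => if acc.any (fun k => PySem.Str.isIn frag k) then acc else acc ++ [frag])
        (S₁.filter (pvMaxB u)) = (S₁ ++ S₂).filter (pvMaxB u) := by
  intro S₂
  induction S₂ with
  | nil => intro S₁ _ _; simp
  | cons f rest ih =>
    intro S₁ hperm hpw
    have hndL : (S₁ ++ f :: rest).Nodup := hperm.nodup_iff.mpr hnd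
    have hmemu : ∀ x ∈ S₁ ++ f :: rest, x ∈ u := fun x hx => hperm.mem_iff.mp hx
    by_cases hmx : pvMaxB u f = true
    · -- f is maximal: no kept fragment contains it, so it is appended
      have hguard : (S₁.filter (pvMaxB u)).any (fun k => PySem.Str.isIn f k) = false := by
        by_contra hc
        rcases List.any_eq_true.mp (Bool.not_eq_false _ |>.mp hc) with ⟨k, hk, hin⟩
        have hkS₁ : k ∈ S₁ := List.mem_of_mem_filter hk
        have hku : k ∈ u := hmemu k (List.mem_append_left _ hkS₁)
        have := List.all_eq_true.mp hmx k hku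
        simp only [Bool.or_eq_true, beq_iff_eq, Bool.not_eq_eq_eq_not, Bool.not_true] at this
        rcases this with hfk | hnin
        · -- f = k contradicts Nodup of S₁ ++ f :: rest
          have hfS₁ : f ∉ S₁ := by
            have := List.disjoint_of_nodup_append hndL
            intro hin'; exact this hin' List.mem_cons_self
          exact hfS₁ (hfk ▸ hkS₁)
        · rw [hnin] at hin; exact Bool.false_ne_true hin
      rw [List.foldl_cons, hguard]
      simp only [Bool.false_eq_true, if_false]
      have hstep : S₁.filter (pvMaxB u) ++ [f] = (S₁ ++ [f]).filter (pvMaxB u) := by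
        simp [List.filter_append, hmx]
      rw [hstep]
      have := ih (S₁ ++ [f]) (by simpa using hperm) (by simpa using hpw)
      simpa using this
    · -- f is redundant: a maximal container of f is strictly longer, hence already kept
      have hfu : f ∈ u := hmemu f (List.mem_append_right _ List.mem_cons_self)
      have : ∃ x ∈ u, ¬(f == x || !PySem.Str.isIn f x) = true := by
        rcases List.all_eq_false.mp (Bool.not_eq_true _ |>.mp hmx) with ⟨x, hx, hpx⟩
        exact ⟨x, hx, by simpa using hpx⟩
      rcases this with ⟨x, hx, hpx⟩
      simp only [Bool.or_eq_true, beq_iff_eq, Bool.not_eq_eq_eq_not, Bool.not_true, not_or,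
        ← Bool.not_eq_true, not_not] at hpx
      obtain ⟨hfx, hin⟩ := hpx
      rcases pvExistsMax u f (List.foldl max 0 (u.map (fun s => s.toList.length))) x hx
          ((PySem.Str.isIn_iff_infix f x).mp hin) hfx (by omega) with ⟨h, hhu, hfh, hinf, hhmx⟩
      have hlt : f.toList.length < h.toList.length := pvInfixLt f h hinf hfh
      -- h is somewhere in S₁ ++ f :: rest; by the length ordering it must be in S₁
      have hhL : h ∈ S₁ ++ f :: rest := hperm.symm.mem_iff.mp hhu
      have hhS₁ : h ∈ S₁ := by
        rcases List.mem_append.mp hhL with h1 | h2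
        · exact h1
        · exfalso
          rcases List.mem_cons.mp h2 with he | hr
          · exact hfh he.symm
          · -- pairwise: everything in rest is ≤ f in length
            have hpw2 : (f :: rest).Pairwise (fun a b => PySem.Str.len b ≤ PySem.Str.len a) :=
              (List.pairwise_append.mp hpw).2.1
            have := (List.pairwise_cons.mp hpw2).1 h hr
            rw [PySem.Str.len_eq, PySem.Str.len_eq] at this
            omega
      have hguard : (S₁.filter (pvMaxB u)).any (fun k => PySem.Str.isIn f k) = true :=
        List.any_eq_true.mpr ⟨h, List.mem_filter.mpr ⟨hhS₁, hhmx⟩,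
          (PySem.Str.isIn_iff_infix f h).mpr hinf⟩
      rw [List.foldl_cons, hguard]
      simp only [if_true]
      have hstep : S₁.filter (pvMaxB u) = (S₁ ++ [f]).filter (pvMaxB u) := by
        simp [List.filter_append, hmx]
      rw [hstep]
      have := ih (S₁ ++ [f]) (by simpa using hperm) (by simpa using hpw)
      simpa using this

-- B's split fold is A's two comprehensions
lemma pvSplitFold (l : List (List (String × String))) :
    ∀ (a : List String) (b : List (List (String × String))),
      l.foldl (fun (acc : List String × List (List (String × String))) e =>
          if pvEnt e == "practitioner_name" || pvEnt e == "PERSON"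
          then (acc.1 ++ [pvVal e], acc.2)
          else (acc.1, acc.2 ++ [e])) (a, b) =
        (a ++ (l.filter (fun e => ["practitioner_name", "PERSON"].contains (pvEnt e))).map (fun e => pvVal e),
         b ++ l.filter (fun e => !(["practitioner_name", "PERSON"].contains (pvEnt e)))) := by
  induction l with
  | nil => intro a b; simp
  | cons e t ih =>
    intro a b
    have hcont : (["practitioner_name", "PERSON"].contains (pvEnt e)) =
        (pvEnt e == "practitioner_name" || pvEnt e == "PERSON") := by
      rw [Bool.eq_iff_iff]; simp [List.contains_eq_mem]
    rw [List.foldl_cons]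
    by_cases hp : (pvEnt e == "practitioner_name" || pvEnt e == "PERSON") = true
    · rw [if_pos hp, ih, List.filter_cons, List.filter_cons, hcont, hp]
      simp
    · have hp' := Bool.not_eq_true _ |>.mp hp
      rw [if_neg hp, ih, List.filter_cons, List.filter_cons, hcont, hp']
      simp

-- A's append-unless-redundant loop is a filter by maximality
lemma pvCleanedFilter (u : List String) :
    u.foldl (fun acc frag =>
        if u.any (fun other_frag => !(frag == other_frag) && PySem.Str.isIn frag other_frag)
        then acc else acc ++ [frag]) [] = u.filter (pvMaxB u) := by
  have hfun : (fun (acc : List String) frag =>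
      if u.any (fun other_frag => !(frag == other_frag) && PySem.Str.isIn frag other_frag)
      then acc else acc ++ [frag]) =
      (fun acc frag => if pvMaxB u frag then acc ++ [frag] else acc) := by
    funext acc frag
    have hfn : (fun g => !(frag == g || !PySem.Str.isIn frag g)) =
        (fun o => !(frag == o) && PySem.Str.isIn frag o) := by
      funext g
      cases h1 : (frag == g) <;> cases h2 : PySem.Str.isIn frag g <;> simp
    have : pvMaxB u frag = !(u.any (fun o => !(frag == o) && PySem.Str.isIn frag o)) := by
      simp only [pvMaxB, List.all_eq_not_any_not, hfn]
    rw [this]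
    cases u.any (fun o => !(frag == o) && PySem.Str.isIn frag o) <;> simp
  rw [hfun]
  have := PySem.List.foldl_append_if (pvMaxB u) (id) u []
  simpa using this

-- membership in the kept list agrees with maximality, on members of u
lemma pvKeepFilter (u : List String) (hnd : u.Nodup) :
    u.filter (fun f => PySem.Set.contains (PySem.Set.ofList
      ((PySem.List.sorted u PySem.Str.len true).foldl
        (fun acc frag => if acc.any (fun k => PySem.Str.isIn frag k) then acc else acc ++ [frag]) [])) f) =
    u.filter (pvMaxB u) := by
  have hkept : (PySem.List.sorted u PySem.Str.len true).foldl
      (fun acc frag => if acc.any (fun k => PySem.Str.isIn frag k) then acc else acc ++ [frag]) [] =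
      (PySem.List.sorted u PySem.Str.len true).filter (pvMaxB u) := by
    have := pvScanFilter u hnd (PySem.List.sorted u PySem.Str.len true) []
      (by simpa using PySem.List.sorted_perm u PySem.Str.len true)
      (by simpa using PySem.List.sorted_pairwise_rev u PySem.Str.len)
    simpa using this
  rw [hkept]
  apply List.filter_congr
  intro f hf
  have hiff : (f ∈ (PySem.List.sorted u PySem.Str.len true).filter (pvMaxB u)) ↔ pvMaxB u f = true := by
    rw [List.mem_filter]
    constructor
    · exact fun h => h.2
    · exact fun h => ⟨(PySem.List.sorted_perm u PySem.Str.len true).symm.mem_iff.mp hf, h⟩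
  rw [Bool.eq_iff_iff]
  rw [PySem.Set.contains_iff, PySem.Set.mem_ofList]
  exact hiff

-- ===== VERDICT (by name: the statement is the Claim_ definition above) =====
theorem fuse_practitioner_entities_py_spec : Claim_equal_fuse_practitioner_entities_py := by
  intro all_entities text _ _
  show fuse_practitioner_entities_py all_entities text = fuse_practitioner_entities_py_alt all_entities text
  simp only [fuse_practitioner_entities_py, fuse_practitioner_entities_py_alt,
    pvSplitFold all_entities [] [], List.nil_append]
  by_cases hempty : (all_entities.filter
      (fun e => ["practitioner_name", "PERSON"].contains (pvEnt e))).map (fun e => pvVal e) = []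
  · rw [if_pos hempty, if_pos hempty]
  · rw [if_neg hempty, if_neg hempty, pvCleanedFilter,
      pvKeepFilter _ (PySem.List.nodup_dedup _)]
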